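-- pv_equiv track=rewrite | github.com/alberto-escobar/AoC2025 | Day3/main.py | get_first_max
-- ===== SOURCE A (Python) =====
-- def get_first_max(arr):
--     if not arr:
--         return None, None
--
--     max_value = arr[0]
--     max_index = 0
--
--     for i in range(1, len(arr)):
--         if arr[i] > max_value:
--             max_value = arr[i]
--             max_index = i
--
--     return max_value, max_index
-- ===== SOURCE B (Python) =====
-- def get_first_max(arr):
--     if not arr:
--         return None, None
--     m = max(arr)
--     return m, arr.index(m)
-- ===== Notes on version B (the rewrite author's own statement) =====
-- stated objective: idiomatic
-- what changed: Replaces A's single explicit loop that tracks both the running max and its index with two staged builtin passes: max(arr) to get the value, then arr.index(m) to find its first position.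
import Mathlib
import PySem

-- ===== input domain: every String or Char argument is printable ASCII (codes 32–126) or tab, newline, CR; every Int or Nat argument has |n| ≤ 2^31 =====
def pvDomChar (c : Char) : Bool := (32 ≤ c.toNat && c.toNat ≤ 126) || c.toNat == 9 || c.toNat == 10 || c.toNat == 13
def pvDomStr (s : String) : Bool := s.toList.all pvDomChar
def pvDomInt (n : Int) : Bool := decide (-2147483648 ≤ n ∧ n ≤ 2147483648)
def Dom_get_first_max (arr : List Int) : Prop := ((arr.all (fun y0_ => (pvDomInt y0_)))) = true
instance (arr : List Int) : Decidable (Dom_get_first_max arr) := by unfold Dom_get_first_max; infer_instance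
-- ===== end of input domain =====

-- B replaces A's single explicit tracking loop with two staged builtin passes (max, then first index of it); idiomatic, same O(n) cost.


-- ===== PORT A =====
-- for i in range(1, len(arr)): arr[i] is always in range, so pyGetD's default is never read
def get_first_max (arr : List Int) : Option Int × Option Int :=
  match arr with
  | [] => (none, none)
  | a :: _ =>
    let st := (PySem.List.pyRange 1 (arr.length : Int) 1).foldl
      (fun (acc : Int × Int) i =>
        if PySem.List.pyGetD arr i 0 > acc.1 then (PySem.List.pyGetD arr i 0, i) else acc)
      (a, 0)
    (some st.1, some st.2)

-- ===== PORT B =====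
-- m = max(arr); return m, arr.index(m)   (m ∈ arr, so index? never misses; the none arm is unreachable)
def get_first_max_alt (arr : List Int) : Option Int × Option Int :=
  match arr with
  | [] => (none, none)
  | _ :: _ =>
    match PySem.List.max? arr (fun x => x) with
    | none => (none, none)
    | some m =>
      match PySem.List.index? arr m with
      | none => (none, none)
      | some j => (some m, some (j : Int))

-- ===== PRECONDITION & SPEC =====
def Spec_get_first_max (arr : List Int) (out : Option Int × Option Int) : Prop := out = get_first_max_alt arr
instance (arr : List Int) (out : Option Int × Option Int) : Decidable (Spec_get_first_max arr out) := by unfold Spec_get_first_max; infer_instance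

-- ===== CLAIM (what is proved, stated in full; the proofs are below) =====
def Claim_equal_get_first_max : Prop := ∀ (arr : List Int), Dom_get_first_max arr → Spec_get_first_max arr (get_first_max arr)

-- ===== LEMMAS AND PROOFS =====

-- A's index loop over range(s, len arr) equals the pair loop over enumerate (arr.drop s) s
theorem loopA_eq_enum (t arr : List Int) (s : Nat) (h : arr.drop s = t) (acc : Int × Int) :
    (PySem.List.pyRange (s : Int) (arr.length : Int) 1).foldl
      (fun (acc : Int × Int) i =>
        if PySem.List.pyGetD arr i 0 > acc.1 then (PySem.List.pyGetD arr i 0, i) else acc) acc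
    = (PySem.List.enumerate t (s : Int)).foldl
      (fun (acc : Int × Int) p => if p.2 > acc.1 then (p.2, p.1) else acc) acc := by
  induction t generalizing s acc with
  | nil =>
    have hs : arr.length ≤ s := by
      by_contra hlt
      push Not at hlt
      have := List.drop_eq_nil_iff.mp h
      omega
    rw [PySem.List.pyRange_one_eq_nil (by exact_mod_cast hs)]
    simp [PySem.List.enumerate]
  | cons x t' ih =>
    have hs : s < arr.length := by
      by_contra hlt
      push Not at hlt
      simp [List.drop_eq_nil_iff.mpr hlt] at h
    have hget : PySem.List.pyGetD arr (s : Int) 0 = x := by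
      rw [PySem.List.pyGetD_eq_getElem arr 0 (by positivity) (by exact_mod_cast hs)]
      have : arr[s]'(by simpa using hs) = (arr.drop s)[0]'(by simp [h]) := by
        simp [List.getElem_drop]
      simpa [h] using this
    rw [PySem.List.pyRange_one_cons (by exact_mod_cast hs), PySem.List.enumerate_cons]
    simp only [List.foldl_cons, hget]
    have hdrop : arr.drop (s + 1) = t' := by
      have h2 : List.drop 1 (List.drop s arr) = List.drop (s + 1) arr := List.drop_drop
      rw [h] at h2
      simpa using h2.symm
    have := ih (s + 1) hdrop (if x > acc.1 then (x, (s : Int)) else acc)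
    simpa [Nat.cast_add] using this

-- running max is v itself when every element is ≤ v
theorem foldl_max_of_all_le (l : List Int) (v : Int) (h : ∀ x ∈ l, x ≤ v) :
    l.foldl max v = v := by
  induction l generalizing v with
  | nil => rfl
  | cons x t ih =>
    have hx : x ≤ v := h x (by simp)
    simp only [List.foldl_cons, max_eq_left hx]
    exact ih v (fun y hy => h y (by simp [hy]))

-- when some element exceeds v, the running max exceeds v and is attained in the list
theorem foldl_max_of_not_all_le (l : List Int) (v : Int) (h : ¬ ∀ x ∈ l, x ≤ v) :
    v < l.foldl max v ∧ l.foldl max v ∈ l := by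
  induction l generalizing v with
  | nil => exact absurd (by simp) h
  | cons x t ih =>
    by_cases hx : x ≤ v
    · have ht : ¬ ∀ y ∈ t, y ≤ v := by
        intro hall
        exact h (by intro y hy; rcases List.mem_cons.mp hy with rfl | hy; exact hx; exact hall y hy)
      have := ih v ht
      constructor
      · simpa [List.foldl_cons, max_eq_left hx] using this.1
      · simp only [List.foldl_cons, max_eq_left hx]
        exact List.mem_cons_of_mem _ this.2
    · push Not at hx
      simp only [List.foldl_cons, max_eq_right (le_of_lt hx)]
      by_cases ht : ∀ y ∈ t, y ≤ x
      · rw [foldl_max_of_all_le t x ht]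
        exact ⟨hx, by simp⟩
      · have := ih x ht
        exact ⟨lt_trans hx this.1, List.mem_cons_of_mem _ this.2⟩

-- the A-side pair fold computes (running max, its first index relative to start k)
theorem fold_pair (l : List Int) (k : Nat) (v i : Int) :
    (PySem.List.enumerate l (k : Int)).foldl
      (fun (acc : Int × Int) p => if p.2 > acc.1 then (p.2, p.1) else acc) (v, i)
    = (l.foldl max v,
       if ∀ x ∈ l, x ≤ v then i
       else (k : Int) + (((PySem.List.index? l (l.foldl max v)).getD 0 : Nat) : Int)) := by
  induction l generalizing k v i with
  | nil => simp [PySem.List.enumerate]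
  | cons x t ih =>
    rw [PySem.List.enumerate_cons]
    simp only [List.foldl_cons]
    by_cases hx : x > v
    · rw [if_pos hx]
      have hk1 : (k : Int) + 1 = ((k + 1 : Nat) : Int) := by push_cast; ring
      rw [hk1, ih (k + 1) x (k : Int)]
      have hnall : ¬ ∀ y ∈ (x :: t), y ≤ v := by
        intro hall; have := hall x (by simp); omega
      rw [if_neg hnall]
      simp only [max_eq_right (le_of_lt hx)]
      by_cases ht : ∀ y ∈ t, y ≤ x
      · rw [if_pos ht, foldl_max_of_all_le t x ht,
            PySem.List.index?_cons_self]
        simp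
      · rw [if_neg ht]
        obtain ⟨hlt, hmem⟩ := foldl_max_of_not_all_le t x ht
        have hne : x ≠ t.foldl max x := ne_of_lt hlt
        rw [PySem.List.index?_cons_of_ne _ hne]
        obtain ⟨j, hj⟩ := Option.isSome_iff_exists.mp
          ((PySem.List.index?_isSome_iff t (t.foldl max x)).mpr hmem)
        rw [hj]
        simp [Option.map_some]
        ring
    · rw [if_neg hx]
      push Not at hx
      have hk1 : (k : Int) + 1 = ((k + 1 : Nat) : Int) := by push_cast; ring
      rw [hk1, ih (k + 1) v i]
      simp only [max_eq_left hx]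
      by_cases ht : ∀ y ∈ t, y ≤ v
      · have hall : ∀ y ∈ (x :: t), y ≤ v := by
          intro y hy; rcases List.mem_cons.mp hy with rfl | hy; exact hx; exact ht y hy
        rw [if_pos ht, if_pos hall]
      · have hnall : ¬ ∀ y ∈ (x :: t), y ≤ v := by
          intro hall; exact ht (fun y hy => hall y (by simp [hy]))
        rw [if_neg ht, if_neg hnall]
        obtain ⟨hlt, hmem⟩ := foldl_max_of_not_all_le t v ht
        have hne : x ≠ t.foldl max v := ne_of_lt (lt_of_le_of_lt hx hlt)
        rw [PySem.List.index?_cons_of_ne _ hne]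
        obtain ⟨j, hj⟩ := Option.isSome_iff_exists.mp
          ((PySem.List.index?_isSome_iff t (t.foldl max v)).mpr hmem)
        rw [hj]
        simp [Option.map_some]
        ring

-- ===== VERDICT (by name: the statement is the Claim_ definition above) =====
theorem get_first_max_spec : Claim_equal_get_first_max := by
  intro arr _
  unfold Spec_get_first_max
  match arr with
  | [] => rfl
  | a :: rest =>
    unfold get_first_max get_first_max_alt
    simp only []
    have hA := loopA_eq_enum rest (a :: rest) 1 (by simp) (a, 0)
    rw [Nat.cast_one] at hA
    rw [hA]
    have h1 : ((1 : Int)) = ((1 : Nat) : Int) := by norm_num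
    rw [h1, fold_pair rest 1 a 0]
    rw [PySem.List.max?_id_cons]
    set M := rest.foldl max a with hM
    by_cases ht : ∀ y ∈ rest, y ≤ a
    · rw [if_pos ht]
      have hMa : M = a := foldl_max_of_all_le rest a ht
      rw [hMa]
      have hc : PySem.List.index? (a :: rest) a = some 0 := PySem.List.index?_cons_self a rest
      simp only [PySem.List.index?_eq_idxOf?] at hc
      simp [hc]
    · rw [if_neg ht]
      obtain ⟨hlt, hmem⟩ := foldl_max_of_not_all_le rest a ht
      have hne : a ≠ M := ne_of_lt hlt
      obtain ⟨j, hj⟩ := Option.isSome_iff_exists.mp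
        ((PySem.List.index?_isSome_iff rest M).mpr hmem)
      have hc : PySem.List.index? (a :: rest) M = some (j + 1) := by
        rw [PySem.List.index?_cons_of_ne _ hne, hj]
        rfl
      simp only [PySem.List.index?_eq_idxOf?] at hc hj
      simp [hc, hj]
      ring
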